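-- pv_equiv track=rewrite | github.com/abuqiqi/NADQC | src/navi/mapper.py | _infer_perm_from_partitions
-- ===== SOURCE A (Python) =====
-- from collections import defaultdict
--
-- def _infer_perm_from_partitions(
--
--         original_partition: list[list[int]],
--         mapped_partition: list[list[int]],
--     ) -> tuple[int, ...]:
--     """
--     推断满足 mapped_partition[i] = original_partition[perm[i]] 的 perm。
--     """
--     index_by_block: dict[tuple[int, ...], list[int]] = defaultdict(list)
--     for idx, block in enumerate(original_partition):
--         index_by_block[tuple(block)].append(idx)
--
--     perm: list[int] = []
--     for block in mapped_partition:
--         key = tuple(block)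
--         if key not in index_by_block or not index_by_block[key]:
--             raise ValueError(f"Failed to infer perm, block {block} not found in original partition.")
--         perm.append(index_by_block[key].pop(0))
--
--     return tuple(perm)
-- ===== SOURCE B (Python) =====
-- def _nth_occurrence_index(blocks, block, r):
--     """Index of the r-th (0-based) occurrence of block in blocks, or None."""
--     seen = 0
--     for i, b in enumerate(blocks):
--         if b == block:
--             if seen == r:
--                 return i
--             seen += 1
--     return None
--
-- def _infer_perm_from_partitions(
--         original_partition: list[list[int]],
--         mapped_partition: list[list[int]],
--     ) -> tuple[int, ...]:
--     """perm[j] is the index of the r-th occurrence of mapped_partition[j] in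
--     original_partition, where r is how often that block occurred earlier in
--     mapped_partition: purely positional rank arithmetic, no matching state."""
--     perm = []
--     for j, block in enumerate(mapped_partition):
--         r = mapped_partition[:j].count(block)
--         idx = _nth_occurrence_index(original_partition, block, r)
--         if idx is None:
--             raise ValueError(f"Failed to infer perm, block {block} not found in original partition.")
--         perm.append(idx)
--     return tuple(perm)
-- ===== Notes on version B (the rewrite author's own statement) =====
-- stated objective: alternative
-- what changed: B computes each perm entry independently and statelessly: entry j is the index of the r-th occurrence of mapped_partition[j] in original_partition, where r is the count of that block among the earlier mapped blocks, replacing A's mutable dict of per-block index queues popped in order.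
import Mathlib
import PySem

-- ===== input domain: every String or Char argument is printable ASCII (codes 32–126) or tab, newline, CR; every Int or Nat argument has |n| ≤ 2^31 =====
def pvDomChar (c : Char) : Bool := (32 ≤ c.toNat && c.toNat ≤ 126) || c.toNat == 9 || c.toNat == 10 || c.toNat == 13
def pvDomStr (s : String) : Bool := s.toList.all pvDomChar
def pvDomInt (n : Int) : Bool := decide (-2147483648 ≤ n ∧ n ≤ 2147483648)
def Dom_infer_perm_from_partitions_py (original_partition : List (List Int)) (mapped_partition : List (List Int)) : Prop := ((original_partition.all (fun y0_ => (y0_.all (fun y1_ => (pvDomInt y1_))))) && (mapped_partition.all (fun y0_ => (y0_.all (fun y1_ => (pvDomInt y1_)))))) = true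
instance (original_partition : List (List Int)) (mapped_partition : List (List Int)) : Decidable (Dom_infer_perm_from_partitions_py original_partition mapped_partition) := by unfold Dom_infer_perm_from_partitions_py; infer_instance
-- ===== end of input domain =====

-- B computes every perm entry independently by occurrence-rank arithmetic instead
-- of A's mutable dict of per-block index queues (objective: alternative).
-- Equivalence is about the RETURN value; on inputs where the Pythons raise
-- (excluded by Pre_) both ports return [].

-- ===== PORT A =====
-- index_by_block = defaultdict(list); for idx, block in enumerate(...): index_by_block[tuple(block)].append(idx)
def pvBuildIndex (original_partition : List (List Int)) : PySem.Dict (List Int) (List Int) :=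
  (PySem.List.enumerate original_partition).foldl
    (fun d p => d.insert p.2 (d.getD p.2 [] ++ [p.1])) PySem.Dict.empty

-- the 'for block in mapped_partition' loop; none = the ValueError branch
def pvLoopA : List (List Int) → PySem.Dict (List Int) (List Int) → List Int → Option (List Int)
  | [], _, perm => some perm
  | block :: rest, d, perm =>
    match d.getD block [] with
    | [] => none                     -- key missing or queue empty: raise ValueError
    | i :: q => pvLoopA rest (d.insert block q) (perm ++ [i])   -- .pop(0)

def infer_perm_from_partitions_py (original_partition : List (List Int)) (mapped_partition : List (List Int)) : List Int :=
  (pvLoopA mapped_partition (pvBuildIndex original_partition) []).getD []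

-- ===== PORT B =====
-- _nth_occurrence_index: scan blocks with enumerate index i and a seen-counter
def pvNthOcc : List (List Int) → List Int → Nat → Int → Nat → Option Int
  | [], _, _, _, _ => none
  | b :: rest, block, r, i, seen =>
    if b = block then
      (if seen = r then some i else pvNthOcc rest block r (i + 1) (seen + 1))
    else pvNthOcc rest block r (i + 1) seen

-- the 'for j, block in enumerate(mapped_partition)' loop; pref is mapped_partition[:j]
def pvLoopB (orig : List (List Int)) : List (List Int) → List (List Int) → List Int → Option (List Int)
  | [], _, perm => some perm
  | block :: rest, pref, perm =>
    match pvNthOcc orig block (pref.count block) 0 0 with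
    | none => none                   -- idx is None: raise ValueError
    | some i => pvLoopB orig rest (pref ++ [block]) (perm ++ [i])

def infer_perm_from_partitions_py_alt (original_partition : List (List Int)) (mapped_partition : List (List Int)) : List Int :=
  (pvLoopB original_partition mapped_partition [] []).getD []

-- ===== PRECONDITION & SPEC =====
-- Pre_ excludes exactly the inputs on which A raises ValueError (some mapped block
-- occurs more often than in the original partition); B raises the same error there.
def Pre_infer_perm_from_partitions_py (original_partition : List (List Int)) (mapped_partition : List (List Int)) : Prop :=
  ∀ b ∈ mapped_partition, mapped_partition.count b ≤ original_partition.count b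
instance (original_partition : List (List Int)) (mapped_partition : List (List Int)) : Decidable (Pre_infer_perm_from_partitions_py original_partition mapped_partition) := by unfold Pre_infer_perm_from_partitions_py; infer_instance

def pvWitness_infer_perm_from_partitions_py : List (List Int) × List (List Int) :=
  ([[1, 2], [3], [1, 2]], [[3], [1, 2], [1, 2]])

def Spec_infer_perm_from_partitions_py (original_partition : List (List Int)) (mapped_partition : List (List Int)) (out : List Int) : Prop := out = infer_perm_from_partitions_py_alt original_partition mapped_partition
instance (original_partition : List (List Int)) (mapped_partition : List (List Int)) (out : List Int) : Decidable (Spec_infer_perm_from_partitions_py original_partition mapped_partition out) := by unfold Spec_infer_perm_from_partitions_py; infer_instance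

-- ===== CLAIM (what is proved, stated in full; the proofs are below) =====
def Claim_equal_infer_perm_from_partitions_py : Prop := ∀ (original_partition : List (List Int)) (mapped_partition : List (List Int)), Dom_infer_perm_from_partitions_py original_partition mapped_partition → Pre_infer_perm_from_partitions_py original_partition mapped_partition → Spec_infer_perm_from_partitions_py original_partition mapped_partition (infer_perm_from_partitions_py original_partition mapped_partition)

-- ===== LEMMAS AND PROOFS =====

-- indices (starting at i) of the occurrences of k in a list of blocks
def pvIdxF : List (List Int) → List Int → Int → List Int
  | [], _, _ => []
  | b :: rest, k, i =>
    if b = k then i :: pvIdxF rest k (i + 1) else pvIdxF rest k (i + 1)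

-- the queue a dict-build over an enumeration yields, as pvIdxF
def pvKeyIdx (avail : List (Int × List Int)) (k : List Int) : List Int :=
  (avail.filter (fun p => decide (p.2 = k))).map (·.1)

theorem pvKeyIdx_cons (p : Int × List Int) (l : List (Int × List Int)) (k : List Int) :
    pvKeyIdx (p :: l) k = if p.2 = k then p.1 :: pvKeyIdx l k else pvKeyIdx l k := by
  by_cases h : p.2 = k <;> simp [pvKeyIdx, h]

theorem pvKeyIdx_enumerate (l : List (List Int)) (k : List Int) (i : Int) :
    pvKeyIdx (PySem.List.enumerate l i) k = pvIdxF l k i := by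
  induction l generalizing i with
  | nil => simp [pvKeyIdx, pvIdxF, PySem.List.enumerate_nil]
  | cons b rest ih =>
    rw [PySem.List.enumerate_cons, pvKeyIdx_cons, pvIdxF, ih]

-- the index build: final queue of k = queues already in d, then the indices of k in l
theorem pvBuild_getD (l : List (Int × List Int)) (d : PySem.Dict (List Int) (List Int)) (k : List Int) :
    (l.foldl (fun d p => d.insert p.2 (d.getD p.2 [] ++ [p.1])) d).getD k []
      = d.getD k [] ++ pvKeyIdx l k := by
  induction l generalizing d with
  | nil => simp [pvKeyIdx]
  | cons p l ih =>
    rw [List.foldl_cons, ih, pvKeyIdx_cons, PySem.Dict.getD_insert]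
    by_cases h : k = p.2
    · subst h; rw [if_pos rfl, if_pos rfl]; simp
    · rw [if_neg h, if_neg (fun hh => h hh.symm)]

-- the nth-occurrence scan is lookup into the occurrence-index list
theorem pvNthOcc_eq (l : List (List Int)) (k : List Int) (r seen : Nat) (i : Int)
    (h : seen ≤ r) :
    pvNthOcc l k r i seen = (pvIdxF l k i)[r - seen]? := by
  induction l generalizing i seen with
  | nil => simp [pvNthOcc, pvIdxF]
  | cons b rest ih =>
    by_cases hb : b = k
    · rw [pvNthOcc, if_pos hb, pvIdxF, if_pos hb]
      by_cases hs : seen = r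
      · rw [if_pos hs, hs, Nat.sub_self]; simp
      · have hlt : seen < r := lt_of_le_of_ne h hs
        rw [if_neg hs, ih _ _ hlt]
        have : r - seen = (r - (seen + 1)) + 1 := by omega
        rw [this]; simp
    · rw [pvNthOcc, if_neg hb, pvIdxF, if_neg hb, ih _ _ h]

-- main invariant: queues of the dict = suffixes of the occurrence-index lists
theorem pvLoop_eq (orig : List (List Int)) (m : List (List Int))
    (d : PySem.Dict (List Int) (List Int)) (pref : List (List Int)) (perm : List Int)
    (hinv : ∀ k, d.getD k [] = (pvIdxF orig k 0).drop (pref.count k)) :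
    pvLoopA m d perm = pvLoopB orig m pref perm := by
  induction m generalizing d pref perm with
  | nil => rfl
  | cons b rest ih =>
    have hnth : pvNthOcc orig b (pref.count b) 0 0
        = ((pvIdxF orig b 0).drop (pref.count b)).head? := by
      rw [pvNthOcc_eq orig b (pref.count b) 0 0 (Nat.zero_le _), Nat.sub_zero,
        List.head?_drop]
    simp only [pvLoopA, pvLoopB]
    cases hq : d.getD b [] with
    | nil =>
      rw [hinv b] at hq
      rw [hnth, hq]; rfl
    | cons i q =>
      rw [hinv b] at hq
      rw [hnth, hq]
      simp only [List.head?_cons]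
      refine ih _ _ _ (fun k => ?_)
      rw [PySem.Dict.getD_insert]
      by_cases hk : k = b
      · subst hk
        rw [if_pos rfl]
        have : (pref ++ [k]).count k = pref.count k + 1 := by simp
        rw [this, ← List.drop_drop, hq]
        simp
      · rw [if_neg hk, hinv k]
        have : (pref ++ [b]).count k = pref.count k := by
          simp [List.count_append]
          simp [List.count_singleton]
          exact fun hh => hk hh.symm
        rw [this]

-- ===== VERDICT (by name: the statement is the Claim_ definition above) =====
theorem infer_perm_from_partitions_py_spec : Claim_equal_infer_perm_from_partitions_py := by
  intro original_partition mapped_partition _ _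
  unfold Spec_infer_perm_from_partitions_py infer_perm_from_partitions_py infer_perm_from_partitions_py_alt
  rw [pvLoop_eq original_partition mapped_partition (pvBuildIndex original_partition) [] []
        (fun k => by
          rw [pvBuildIndex, pvBuild_getD, pvKeyIdx_enumerate]
          simp)]
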